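-- pv_equiv track=rewrite | github.com/zzz136454872/leetcode | findSwapValues.py | findSwapValues
-- ===== SOURCE A (Python) =====
-- from typing import List
--
-- def findSwapValues(array1: List[int],
--                    array2: List[int]) -> List[int]:
--     s1 = sum(array1)
--     s2 = sum(array2)
--
--     if (s1 - s2) % 2 != 0:
--         return []
--     array1.sort()
--     array2.sort()
--     diff = (s2 - s1) // 2
--     j = 0
--
--     for i in range(len(array1)):
--         target = array1[i] + diff
--
--         while j < len(array2) and array2[j] < target:
--             j += 1
--
--         if j < len(array2) and array2[j] == target:
--             return (array1[i], array2[j])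
--
--     return []
-- ===== SOURCE B (Python) =====
-- def findSwapValues(array1, array2):
--     # One-line honest note: mutates both arguments in place by sorting, like A.
--     s1 = sum(array1)
--     s2 = sum(array2)
--     if (s1 - s2) % 2 != 0:
--         return []
--     array1.sort()
--     array2.sort()
--     diff = (s2 - s1) // 2
--     present = set(array2)
--     for a in array1:
--         if a + diff in present:
--             return (a, a + diff)
--     return []
-- ===== Notes on version B (the rewrite author's own statement) =====
-- stated objective: alternative
-- what changed: Replaces A's stateful two-pointer merge over sorted array2 (a persistent index j advanced by an inner while loop) with a hash set of array2 built once and a single membership-test scan over sorted array1, eliminating the inner loop and the pointer state.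
import Mathlib
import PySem

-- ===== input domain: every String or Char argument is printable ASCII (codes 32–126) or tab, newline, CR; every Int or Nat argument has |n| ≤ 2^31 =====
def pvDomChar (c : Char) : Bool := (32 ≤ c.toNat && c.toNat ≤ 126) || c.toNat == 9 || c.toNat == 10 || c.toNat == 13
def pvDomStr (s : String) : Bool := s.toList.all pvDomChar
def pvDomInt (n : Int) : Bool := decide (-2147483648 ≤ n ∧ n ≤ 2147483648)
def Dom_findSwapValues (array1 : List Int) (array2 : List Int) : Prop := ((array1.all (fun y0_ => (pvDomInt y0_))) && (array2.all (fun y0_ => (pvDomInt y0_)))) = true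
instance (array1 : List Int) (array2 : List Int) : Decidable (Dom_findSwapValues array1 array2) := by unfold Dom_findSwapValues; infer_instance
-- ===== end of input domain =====

-- B replaces A's two-pointer merge over sorted array2 with a hash-set membership test built
-- once (objective: alternative). Both Pythons sort both argument lists IN PLACE; the
-- equivalence proved here is about the return value only (the mutation is identical anyway).

-- ===== PORT A =====
-- the 'while j < len(array2) and array2[j] < target' loop: advancing j over the sorted
-- array2 is dropping the leading elements < target from the remaining suffix
def fsvWhile (target : Int) : List Int → List Int
  | [] => []
  | y :: ys => if y < target then fsvWhile target ys else y :: ys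

-- the 'for i in range(len(array1))' loop; the suffix of array2 from index j is the second state
def fsvFor (diff : Int) : List Int → List Int → List Int
  | [], _ => []
  | a :: as_, ys =>
      let target := a + diff
      let ys' := fsvWhile target ys
      match ys' with
      | y :: _ => if y = target then [a, y] else fsvFor diff as_ ys'
      | [] => fsvFor diff as_ ys'

def findSwapValues (array1 : List Int) (array2 : List Int) : List Int :=
  let s1 := array1.sum
  let s2 := array2.sum
  if PySem.Int.mod (s1 - s2) 2 ≠ 0 then []
  else
    let a1 := PySem.List.sorted array1 (fun x => x) false
    let a2 := PySem.List.sorted array2 (fun x => x) false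
    let diff := PySem.Int.floordiv (s2 - s1) 2
    fsvFor diff a1 a2

-- ===== PORT B =====
-- 'for a in array1: if a + diff in present: return (a, a + diff)'
def fsvScan (diff : Int) (present : PySem.Set Int) : List Int → List Int
  | [] => []
  | a :: as_ => if present.contains (a + diff) then [a, a + diff] else fsvScan diff present as_

def findSwapValues_alt (array1 : List Int) (array2 : List Int) : List Int :=
  let s1 := array1.sum
  let s2 := array2.sum
  if PySem.Int.mod (s1 - s2) 2 ≠ 0 then []
  else
    let a1 := PySem.List.sorted array1 (fun x => x) false
    let a2 := PySem.List.sorted array2 (fun x => x) false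
    let diff := PySem.Int.floordiv (s2 - s1) 2
    let present := PySem.Set.ofList a2
    fsvScan diff present a1

-- ===== PRECONDITION & SPEC =====
def Spec_findSwapValues (array1 : List Int) (array2 : List Int) (out : List Int) : Prop := out = findSwapValues_alt array1 array2
instance (array1 : List Int) (array2 : List Int) (out : List Int) : Decidable (Spec_findSwapValues array1 array2 out) := by unfold Spec_findSwapValues; infer_instance

-- ===== CLAIM (what is proved, stated in full; the proofs are below) =====
def Claim_equal_findSwapValues : Prop := ∀ (array1 : List Int) (array2 : List Int), Dom_findSwapValues array1 array2 → Spec_findSwapValues array1 array2 (findSwapValues array1 array2)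

-- ===== LEMMAS AND PROOFS =====

theorem fsvWhile_eq_dropWhile (t : Int) (ys : List Int) :
    fsvWhile t ys = ys.dropWhile (fun y => decide (y < t)) := by
  induction ys with
  | nil => rfl
  | cons y ys ih =>
      simp only [fsvWhile, List.dropWhile_cons]
      by_cases h : y < t <;> simp [h, ih]

theorem mem_fsvWhile_iff (t x : Int) (ys : List Int) (hx : t ≤ x) :
    x ∈ fsvWhile t ys ↔ x ∈ ys := by
  rw [fsvWhile_eq_dropWhile]
  constructor
  · exact fun h => (List.dropWhile_sublist _).mem h
  · intro h
    have := List.takeWhile_append_dropWhile (p := fun y => decide (y < t)) (l := ys)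
    rw [← this, List.mem_append] at h
    rcases h with h | h
    · have := List.mem_takeWhile_imp h
      simp at this; omega
    · exact h

theorem fsvWhile_sorted (t : Int) (ys : List Int) (h : ys.Pairwise (· ≤ ·)) :
    (fsvWhile t ys).Pairwise (· ≤ ·) := by
  rw [fsvWhile_eq_dropWhile]; exact h.sublist (List.dropWhile_sublist _)

theorem fsvWhile_head_ge (t y : Int) (ys rest : List Int) (h : fsvWhile t ys = y :: rest) :
    t ≤ y := by
  induction ys with
  | nil => simp [fsvWhile] at h
  | cons z zs ih =>
      simp only [fsvWhile] at h
      by_cases hz : z < t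
      · simp [hz] at h; exact ih h
      · simp [hz] at h; omega

-- the heart: the two-pointer loop over sorted lists finds the first a in xs with a + diff ∈ ys0,
-- where ys is the current suffix of ys0 agreeing with ys0 on all future targets
theorem fsvFor_eq_scan (diff : Int) (xs ys : List Int)
    (hxs : xs.Pairwise (· ≤ ·)) (hys : ys.Pairwise (· ≤ ·))
    (present : PySem.Set Int)
    (hmem : ∀ a ∈ xs, ((a + diff) ∈ present ↔ (a + diff) ∈ ys)) :
    fsvFor diff xs ys = fsvScan diff present xs := by
  induction xs generalizing ys with
  | nil => rfl
  | cons a as_ ih =>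
      have hmem_a := hmem a (by simp)
      have htail : ∀ b ∈ as_, (b + diff) ∈ present ↔ (b + diff) ∈ ys :=
        fun b hb => hmem b (by simp [hb])
      have hle : ∀ b ∈ as_, a ≤ b := fun b hb => (List.pairwise_cons.mp hxs).1 b hb
      have hxs' : as_.Pairwise (· ≤ ·) := (List.pairwise_cons.mp hxs).2
      have hys'sorted : (fsvWhile (a + diff) ys).Pairwise (· ≤ ·) := fsvWhile_sorted _ ys hys
      have hmem' : ∀ b ∈ as_, (b + diff) ∈ present ↔ (b + diff) ∈ fsvWhile (a + diff) ys := by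
        intro b hb
        rw [htail b hb]
        exact (mem_fsvWhile_iff (a + diff) (b + diff) ys (by have := hle b hb; omega)).symm
      have hmemt : (a + diff) ∈ ys ↔ ∃ rest, fsvWhile (a + diff) ys = (a + diff) :: rest := by
        constructor
        · intro hmt
          have hmt' : (a + diff) ∈ fsvWhile (a + diff) ys :=
            (mem_fsvWhile_iff _ _ ys (le_refl _)).mpr hmt
          cases hy : fsvWhile (a + diff) ys with
          | nil => rw [hy] at hmt'; simp at hmt'
          | cons y rest =>
              have h1 : (a + diff) ≤ y := fsvWhile_head_ge _ y ys rest hy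
              rw [hy] at hmt'
              have hp := hys'sorted; rw [hy] at hp
              have hyeq : y = a + diff := by
                rcases List.mem_cons.mp hmt' with h | h
                · omega
                · have := (List.pairwise_cons.mp hp).1 _ h; omega
              exact ⟨rest, by rw [hyeq]⟩
        · rintro ⟨rest, hr⟩
          have : (a + diff) ∈ fsvWhile (a + diff) ys := by rw [hr]; simp
          exact (mem_fsvWhile_iff _ _ ys (le_refl _)).mp this
      have hcont : present.contains (a + diff) = true ↔ (a + diff) ∈ ys := by
        rw [PySem.Set.contains_iff]; exact hmem_a
      cases hy : fsvWhile (a + diff) ys with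
      | nil =>
          have hnot : ¬ (a + diff) ∈ ys := by
            rw [hmemt]; rintro ⟨rest, hr⟩; rw [hy] at hr; simp at hr
          have hc : present.contains (a + diff) = false := by
            cases h : present.contains (a + diff) with
            | false => rfl
            | true => exact absurd (hcont.mp h) hnot
          simp only [fsvFor, fsvScan, hy, hc, Bool.false_eq_true, if_false]
          rw [hy] at hmem' hys'sorted
          exact ih _ hxs' hys'sorted hmem'
      | cons y rest =>
          by_cases hyt : y = a + diff
          · have : (a + diff) ∈ ys := hmemt.mpr ⟨rest, by rw [hy, hyt]⟩
            have hc : present.contains (a + diff) = true := hcont.mpr this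
            simp only [fsvFor, fsvScan, hy, hc, if_true, hyt]
          · have hnot : ¬ (a + diff) ∈ ys := by
              rw [hmemt]; rintro ⟨rest', hr⟩; rw [hy] at hr
              injection hr with h1 h2; exact hyt h1
            have hc : present.contains (a + diff) = false := by
              cases h : present.contains (a + diff) with
              | false => rfl
              | true => exact absurd (hcont.mp h) hnot
            simp only [fsvFor, fsvScan, hy, hc, Bool.false_eq_true, if_false, if_neg hyt]
            rw [hy] at hmem' hys'sorted
            exact ih _ hxs' hys'sorted hmem'

-- ===== VERDICT (by name: the statement is the Claim_ definition above) =====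
theorem findSwapValues_spec : Claim_equal_findSwapValues := by
  intro array1 array2 _
  unfold Spec_findSwapValues
  simp only [findSwapValues, findSwapValues_alt]
  by_cases h : PySem.Int.mod (array1.sum - array2.sum) 2 ≠ 0
  · rw [if_pos h, if_pos h]
  · rw [if_neg h, if_neg h]
    exact fsvFor_eq_scan _ _ _
      (PySem.List.sorted_pairwise array1 (fun x => x))
      (PySem.List.sorted_pairwise array2 (fun x => x))
      _
      (fun b _ => by rw [PySem.Set.mem_ofList])
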